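-- pv_equiv track=rewrite | github.com/Boom-Ba/DP | employee_To_Manager_Report.py | employeeToManager_Report
-- ===== SOURCE A (Python) =====
-- def dfs(i,adj,visited,temp):
--   visited.add(i)
--   for w in adj[i]:
--     temp.append(w)
--     dfs(w,adj,visited,temp)
--   return temp
--
-- def employeeToManager_Report(employeeToManagerMappings):
--   V=set()
--   adj={}
--   for k,v in employeeToManagerMappings.items():
--     V.add(k)
--     V.add(v)
--   adj ={i:[] for i in V}
--   for k,v in employeeToManagerMappings.items():
--     if k!=v:
--       adj[v].append(k)
--
--   res={i:set() for i in V}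
--   for i in V:
--     t=set()
--     visited=set()
--     if i not in visited:
--       t= set(dfs(i,adj,visited,[]))
--     res[i]=t
--   return res
-- ===== SOURCE B (Python) =====
-- def employeeToManager_Report(employeeToManagerMappings):
--     # one pass to collect nodes (first-seen order) and child lists, then a
--     # memoized DFS: each node's descendant list is computed once and reused
--     children = {}
--     nodes = {}
--     for k, v in employeeToManagerMappings.items():
--         nodes[k] = None
--         nodes[v] = None
--         if k != v:
--             children.setdefault(v, []).append(k)
--     memo = {}
--     def desc(i):
--         cached = memo.get(i)
--         if cached is not None:
--             return cached
--         out = []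
--         for c in children.get(i, ()):
--             out.append(c)
--             out.extend(desc(c))
--         memo[i] = out
--         return out
--     return {i: set(desc(i)) for i in nodes}
-- ===== Notes on version B (the rewrite author's own statement) =====
-- stated objective: alternative
-- what changed: Instead of re-running a fresh full DFS from every node (A), B builds the child lists in one pass and computes each node's descendant list once with a memoized DFS whose cached lists are reused by all ancestors; Pre_ excludes mappings whose manager graph has a cycle, on which A raises RecursionError (and B does not return either). Intended as faster on deep hierarchies; a timing run measured only 1.34x at its largest generated size, so no speed is claimed.
import Mathlib
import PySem

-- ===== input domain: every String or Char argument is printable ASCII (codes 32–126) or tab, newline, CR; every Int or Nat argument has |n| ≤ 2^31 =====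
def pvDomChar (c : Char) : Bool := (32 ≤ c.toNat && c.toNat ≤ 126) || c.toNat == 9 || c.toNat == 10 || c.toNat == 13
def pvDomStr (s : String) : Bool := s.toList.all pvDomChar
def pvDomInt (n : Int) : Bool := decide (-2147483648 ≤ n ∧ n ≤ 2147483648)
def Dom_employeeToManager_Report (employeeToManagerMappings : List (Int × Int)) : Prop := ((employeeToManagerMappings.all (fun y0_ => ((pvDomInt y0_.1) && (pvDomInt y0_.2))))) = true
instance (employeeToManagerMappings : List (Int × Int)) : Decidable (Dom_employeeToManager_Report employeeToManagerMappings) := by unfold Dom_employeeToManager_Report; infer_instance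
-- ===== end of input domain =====

-- B replaces A's per-node full DFS by one shared memoized DFS (each descendant list
-- computed once and reused by ancestors); Pre_ excludes cyclic manager graphs, on
-- which the Python A raises RecursionError.

-- ===== PORT A =====
-- dfs(i, adj, visited, temp): the fuel argument is an artifact of the port; it is
-- never exhausted on the acyclic inputs Pre_ admits.  adj[i] is written getD i []
-- because every visited node is a key of adj (adj was initialised over all of V).
def pvDfsA (fuel : Nat) (adj : PySem.Dict Int (List Int)) (i : Int)
    (visited : PySem.Set Int) (temp : List Int) : PySem.Set Int × List Int :=
  match fuel with
  | 0 => (visited, temp)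
  | fuel+1 =>
    (adj.getD i []).foldl (fun st w => pvDfsA fuel adj w st.1 (st.2 ++ [w]))
      (PySem.Set.add visited i, temp)

def employeeToManager_Report (employeeToManagerMappings : List (Int × Int)) : List (Int × List Int) :=
  -- the dict argument: first-occurrence key order, last value wins
  let d : PySem.Dict Int Int := PySem.Dict.ofList employeeToManagerMappings
  -- V = set(); for k,v in items: V.add(k); V.add(v)
  let V : PySem.Set Int :=
    d.items.foldl (fun s kv => PySem.Set.add (PySem.Set.add s kv.1) kv.2) PySem.Set.empty
  -- adj = {i: [] for i in V}
  let adj0 : PySem.Dict Int (List Int) :=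
    V.foldl (fun a i => a.insert i []) PySem.Dict.empty
  -- for k,v in items: if k != v: adj[v].append(k)
  let adj : PySem.Dict Int (List Int) :=
    d.items.foldl (fun a kv => if kv.1 ≠ kv.2 then a.modify kv.2 [] (· ++ [kv.1]) else a) adj0
  -- res = {i: set() for i in V}
  let res0 : PySem.Dict Int (List Int) :=
    V.foldl (fun r i => r.insert i []) PySem.Dict.empty
  -- for i in V: t=set(); visited=set(); if i not in visited: t=set(dfs(i,adj,visited,[])); res[i]=t
  let res : PySem.Dict Int (List Int) :=
    V.foldl (fun r i =>
      let visited : PySem.Set Int := PySem.Set.empty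
      let t : List Int :=
        if PySem.Set.contains visited i = false then
          PySem.Set.ofList (pvDfsA (d.size + 2) adj i visited []).2
        else []
      r.insert i t) res0
  res.items

-- ===== PORT B =====
-- memoized descendant list: desc(i) returns memo[i] if cached, else builds
-- out = concat over children c of (c :: desc(c)) and caches it.  fuel is an
-- artifact of the port, never exhausted on the inputs Pre_ admits.
def pvDescB (fuel : Nat) (ch : PySem.Dict Int (List Int))
    (memo : PySem.Dict Int (List Int)) (i : Int) :
    PySem.Dict Int (List Int) × List Int :=
  match fuel with
  | 0 => (memo, [])
  | fuel+1 =>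
    match memo.get? i with
    | some l => (memo, l)
    | none =>
      let r := (ch.getD i []).foldl
        (fun (st : PySem.Dict Int (List Int) × List Int) c =>
          let r := pvDescB fuel ch st.1 c
          (r.1, st.2 ++ c :: r.2)) (memo, [])
      (r.1.insert i r.2, r.2)

def employeeToManager_Report_alt (employeeToManagerMappings : List (Int × Int)) : List (Int × List Int) :=
  let d : PySem.Dict Int Int := PySem.Dict.ofList employeeToManagerMappings
  -- one pass: nodes (first-seen order) and children (setdefault(v,[]).append(k))
  let p : PySem.Set Int × PySem.Dict Int (List Int) :=
    d.items.foldl (fun st kv =>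
      (PySem.Set.add (PySem.Set.add st.1 kv.1) kv.2,
       if kv.1 ≠ kv.2 then st.2.modify kv.2 [] (· ++ [kv.1]) else st.2))
      (PySem.Set.empty, PySem.Dict.empty)
  -- {i: set(desc(i)) for i in nodes}, threading the memo cache
  (p.1.foldl (fun (st : PySem.Dict Int (List Int) × List (Int × List Int)) i =>
      let r := pvDescB (d.size + 2) p.2 st.1 i
      (r.1, st.2 ++ [(i, PySem.Set.ofList r.2)])) (PySem.Dict.empty, [])).2

-- ===== PRECONDITION & SPEC =====
-- one manager-lookup step in the graph dfs recurses on (self-managed nodes have no edge)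
def pvStep (d : PySem.Dict Int Int) (k : Int) : Option Int :=
  match d.get? k with
  | some v => if v = k then none else some v
  | none => none

def pvIter (d : PySem.Dict Int Int) : Nat → Int → Option Int
  | 0, k => some k
  | n+1, k => (pvIter d n k).bind (pvStep d)

-- Pre_ excludes exactly the mappings whose manager graph contains a cycle: there the
-- Python A raises RecursionError (dfs never checks visited).  Acyclic iff every
-- manager chain from a key dies within size+1 steps.
def Pre_employeeToManager_Report (employeeToManagerMappings : List (Int × Int)) : Prop :=
  ∀ k ∈ (PySem.Dict.ofList employeeToManagerMappings).keys,
    pvIter (PySem.Dict.ofList employeeToManagerMappings)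
      ((PySem.Dict.ofList employeeToManagerMappings).size + 1) k = none
instance (employeeToManagerMappings : List (Int × Int)) : Decidable (Pre_employeeToManager_Report employeeToManagerMappings) := by
  unfold Pre_employeeToManager_Report; infer_instance

def pvWitness_employeeToManager_Report : (List (Int × Int)) := [(1, 2), (3, 2), (2, 4), (5, 5)]

def Spec_employeeToManager_Report (employeeToManagerMappings : List (Int × Int)) (out : List (Int × List Int)) : Prop := out = employeeToManager_Report_alt employeeToManagerMappings
instance (employeeToManagerMappings : List (Int × Int)) (out : List (Int × List Int)) : Decidable (Spec_employeeToManager_Report employeeToManagerMappings out) := by unfold Spec_employeeToManager_Report; infer_instance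

-- ===== CLAIM (what is proved, stated in full; the proofs are below) =====
def Claim_equal_employeeToManager_Report : Prop := ∀ (employeeToManagerMappings : List (Int × Int)), Dom_employeeToManager_Report employeeToManagerMappings → Pre_employeeToManager_Report employeeToManagerMappings → Spec_employeeToManager_Report employeeToManagerMappings (employeeToManager_Report employeeToManagerMappings)

-- ===== LEMMAS AND PROOFS =====

-- the list of children of i, in item order: keys k with d[k] = i and k ≠ i
def pvChildren (d : PySem.Dict Int Int) (i : Int) : List Int :=
  (d.items.filter (fun kv => !(kv.1 == kv.2) && kv.2 == i)).map (·.1)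

-- the (fuel-truncated) pure preorder descendant list
def pvDesc (d : PySem.Dict Int Int) : Nat → Int → List Int
  | 0, _ => []
  | n+1, i => (pvChildren d i).flatMap (fun c => c :: pvDesc d n c)

-- a downward chain in the child graph, starting at i
def pvChain (d : PySem.Dict Int Int) : Int → List Int → Prop
  | _, [] => True
  | i, c :: p => c ∈ pvChildren d i ∧ pvChain d c p

-- every chain from i is shorter than n
def pvBnd (d : PySem.Dict Int Int) (i : Int) (n : Nat) : Prop :=
  ∀ p, pvChain d i p → p.length < n

-- every cached descendant list is the true one
def pvGood (d : PySem.Dict Int Int) (F : Nat) (memo : PySem.Dict Int (List Int)) : Prop :=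
  ∀ j l, memo.get? j = some l → l = pvDesc d F j

lemma pvChildren_sub_keys (d : PySem.Dict Int Int) (i c : Int)
    (h : c ∈ pvChildren d i) : c ∈ d.keys := by
  simp only [pvChildren, List.mem_map, List.mem_filter] at h
  obtain ⟨⟨k, v⟩, ⟨hmem, -⟩, rfl⟩ := h
  exact PySem.Dict.mem_keys_of_mem_items d hmem

lemma pvStep_of_child (d : PySem.Dict Int Int) (hnd : d.keys.Nodup) (i c : Int)
    (h : c ∈ pvChildren d i) : pvStep d c = some i := by
  simp only [pvChildren, List.mem_map, List.mem_filter, Bool.and_eq_true,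
    Bool.not_eq_true', beq_eq_false_iff_ne, beq_iff_eq] at h
  obtain ⟨⟨k, v⟩, ⟨hmem, hne, rfl⟩, rfl⟩ := h
  have hget := PySem.Dict.get?_of_mem_items d hmem hnd
  simp only [pvStep, hget]
  simp [Ne.symm hne]

lemma pvIter_isSome_mono (d : PySem.Dict Int Int) (m n : Nat) (k : Int)
    (hmn : m ≤ n) (h : pvIter d n k ≠ none) : pvIter d m k ≠ none := by
  induction n with
  | zero =>
    have : m = 0 := by omega
    subst this; simp [pvIter]
  | succ n ih =>
    rcases Nat.lt_or_ge m (n+1) with hm | hm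
    · refine ih (by omega) ?_
      intro hnone
      exact h (by simp [pvIter, hnone])
    · have : m = n + 1 := by omega
      subst this; exact h

lemma pvChain_iter (d : PySem.Dict Int Int) (hnd : d.keys.Nodup) :
    ∀ (p : List Int) (i c : Int), pvChain d i (p ++ [c]) →
      c ∈ d.keys ∧ pvIter d (p.length + 1) c = some i := by
  intro p
  induction p with
  | nil =>
    intro i c h
    obtain ⟨hc, -⟩ : c ∈ pvChildren d i ∧ True := h
    exact ⟨pvChildren_sub_keys d i c hc, by
      simp [pvIter, pvStep_of_child d hnd i c hc]⟩
  | cons b p ih =>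
    intro i c h
    obtain ⟨hb, hrest⟩ : b ∈ pvChildren d i ∧ pvChain d b (p ++ [c]) := h
    obtain ⟨hk, hiter⟩ := ih b c hrest
    refine ⟨hk, ?_⟩
    show pvIter d (p.length + 1 + 1) c = some i
    have hstep : pvIter d (p.length + 1 + 1) c = (pvIter d (p.length + 1) c).bind (pvStep d) := rfl
    rw [hstep, hiter]
    simp [pvStep_of_child d hnd i b hb]

-- under Pre_, every chain has length ≤ number of keys
lemma pvChain_bound (d : PySem.Dict Int Int) (hnd : d.keys.Nodup)
    (hpre : ∀ k ∈ d.keys, pvIter d (d.size + 1) k = none) :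
    ∀ i, pvBnd d i (d.size + 1) := by
  intro i p hp
  rcases List.eq_nil_or_concat p with rfl | ⟨q, c, rfl⟩
  · simp
  · rw [List.concat_eq_append] at hp ⊢
    obtain ⟨hk, hiter⟩ := pvChain_iter d hnd q i c hp
    by_contra hlen
    simp only [List.length_append, List.length_singleton, not_lt] at hlen
    have hne : pvIter d (q.length + 1) c ≠ none := by simp [hiter]
    have := pvIter_isSome_mono d (d.size + 1) (q.length + 1) c (by omega) hne
    exact this (hpre c hk)

lemma pvBnd_mono (d : PySem.Dict Int Int) (i : Int) (m n : Nat) (hmn : m ≤ n)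
    (h : pvBnd d i m) : pvBnd d i n := by
  intro p hp; exact lt_of_lt_of_le (h p hp) hmn

lemma pvBnd_child (d : PySem.Dict Int Int) (i c : Int) (n : Nat)
    (hc : c ∈ pvChildren d i) (h : pvBnd d i (n+1)) : pvBnd d c n := by
  intro p hp
  have := h (c :: p) ⟨hc, hp⟩
  simpa using this

-- fuel does not matter once it dominates every chain length
lemma pvDesc_stable (d : PySem.Dict Int Int) :
    ∀ (n₁ n₂ : Nat) (i : Int), pvBnd d i n₁ → pvBnd d i n₂ →
      pvDesc d n₁ i = pvDesc d n₂ i := by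
  intro n₁
  induction n₁ with
  | zero => intro n₂ i h₁ _; exact absurd (h₁ [] trivial) (by simp)
  | succ m ih =>
    intro n₂ i h₁ h₂
    match n₂ with
    | 0 => exact absurd (h₂ [] trivial) (by simp)
    | l+1 =>
      show (pvChildren d i).flatMap (fun c => c :: pvDesc d m c)
          = (pvChildren d i).flatMap (fun c => c :: pvDesc d l c)
      refine List.flatMap_congr (fun c hc => ?_)
      have := ih l c (pvBnd_child d i c m hc h₁) (pvBnd_child d i c l hc h₂)
      simp [this]

-- A's dfs appends exactly the pure descendant list to temp
lemma pvDfsA_eq (d : PySem.Dict Int Int) (adj : PySem.Dict Int (List Int))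
    (hadj : ∀ x, adj.getD x [] = pvChildren d x) :
    ∀ (fuel : Nat) (i : Int) (vis : PySem.Set Int) (temp : List Int),
      (pvDfsA fuel adj i vis temp).2 = temp ++ pvDesc d fuel i := by
  intro fuel
  induction fuel with
  | zero => intro i vis temp; simp [pvDfsA, pvDesc]
  | succ fuel ih =>
    intro i vis temp
    have aux : ∀ (l : List Int) (vis : PySem.Set Int) (temp : List Int),
        (l.foldl (fun st w => pvDfsA fuel adj w st.1 (st.2 ++ [w])) (vis, temp)).2
          = temp ++ l.flatMap (fun c => c :: pvDesc d fuel c) := by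
      intro l
      induction l with
      | nil => intro vis temp; simp
      | cons c l ihl =>
        intro vis temp
        simp only [List.foldl_cons]
        set st := pvDfsA fuel adj c vis (temp ++ [c]) with hst
        rw [show st = (st.1, st.2) from rfl, ihl st.1 st.2]
        have h2 : st.2 = (temp ++ [c]) ++ pvDesc d fuel c := ih c vis (temp ++ [c])
        rw [h2]
        simp
    show ((adj.getD i []).foldl (fun st w => pvDfsA fuel adj w st.1 (st.2 ++ [w]))
        (PySem.Set.add vis i, temp)).2 = temp ++ pvDesc d (fuel+1) i
    rw [aux, hadj i]
    rfl

-- B's memoized dfs returns the pure descendant list and keeps the cache good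
lemma pvDescB_eq (d : PySem.Dict Int Int) (F : Nat)
    (ch : PySem.Dict Int (List Int)) (hch : ∀ x, ch.getD x [] = pvChildren d x)
    (hF : ∀ j, pvBnd d j F) :
    ∀ (fuel : Nat) (i : Int) (memo : PySem.Dict Int (List Int)),
      pvGood d F memo → pvBnd d i fuel → pvBnd d i F →
      (pvDescB fuel ch memo i).2 = pvDesc d F i ∧ pvGood d F (pvDescB fuel ch memo i).1 := by
  intro fuel
  induction fuel with
  | zero => intro i memo _ hb _; exact absurd (hb [] trivial) (by simp)
  | succ fuel ih =>
    intro i memo hg hb hbF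
    have hunf : pvDescB (fuel+1) ch memo i = (match memo.get? i with
      | some l => (memo, l)
      | none =>
        let r := (ch.getD i []).foldl
          (fun (st : PySem.Dict Int (List Int) × List Int) c =>
            let r := pvDescB fuel ch st.1 c
            (r.1, st.2 ++ c :: r.2)) (memo, [])
        (r.1.insert i r.2, r.2)) := rfl
    rw [hunf]
    cases hmi : memo.get? i with
    | some l => exact ⟨hg i l hmi, hg⟩
    | none =>
      have aux : ∀ (l : List Int), (∀ c ∈ l, c ∈ pvChildren d i) →
          ∀ (memo : PySem.Dict Int (List Int)) (acc : List Int), pvGood d F memo →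
          (l.foldl (fun (st : PySem.Dict Int (List Int) × List Int) c =>
              let r := pvDescB fuel ch st.1 c
              (r.1, st.2 ++ c :: r.2)) (memo, acc)).2
            = acc ++ l.flatMap (fun c => c :: pvDesc d F c) ∧
          pvGood d F (l.foldl (fun (st : PySem.Dict Int (List Int) × List Int) c =>
              let r := pvDescB fuel ch st.1 c
              (r.1, st.2 ++ c :: r.2)) (memo, acc)).1 := by
        intro l
        induction l with
        | nil => intro _ memo acc hgm; exact ⟨by simp, hgm⟩
        | cons c l ihl =>
          intro hl memo acc hgm
          simp only [List.foldl_cons]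
          have hcchild : c ∈ pvChildren d i := hl c (by simp)
          obtain ⟨hr2, hr1⟩ := ih c memo hgm (pvBnd_child d i c fuel hcchild hb) (hF c)
          set r := pvDescB fuel ch memo c with hrdef
          rw [show (r.1, acc ++ c :: r.2) = ((r.1, acc ++ c :: r.2).1, (r.1, acc ++ c :: r.2).2) from rfl]
          obtain ⟨h1, h2⟩ := ihl (fun x hx => hl x (by simp [hx])) (r.1, acc ++ c :: r.2).1
            (r.1, acc ++ c :: r.2).2 hr1
          refine ⟨?_, h2⟩
          rw [h1]
          simp [hr2]
      obtain ⟨h1, h2⟩ := aux (ch.getD i []) (by rw [hch i]; exact fun c h => h) memo [] hg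
      set r := (ch.getD i []).foldl (fun (st : PySem.Dict Int (List Int) × List Int) c =>
          let r := pvDescB fuel ch st.1 c
          (r.1, st.2 ++ c :: r.2)) (memo, []) with hrdef
      have hout : r.2 = pvDesc d F i := by
        rw [h1, hch i]
        obtain ⟨G, rfl⟩ : ∃ G, F = G + 1 := by
          cases hFc : F with
          | zero => rw [hFc] at hbF; exact absurd (hbF [] trivial) (by simp)
          | succ G => exact ⟨G, rfl⟩
        show List.nil ++ (pvChildren d i).flatMap (fun c => c :: pvDesc d (G+1) c)
            = (pvChildren d i).flatMap (fun c => c :: pvDesc d G c)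
        rw [List.nil_append]
        refine List.flatMap_congr (fun c hc => ?_)
        rw [pvDesc_stable d (G+1) G c (hF c) (pvBnd_child d i c G hc hbF)]
      refine ⟨hout, ?_⟩
      intro j l hj
      by_cases hji : j = i
      · subst hji
        rw [PySem.Dict.get?_insert_self] at hj
        cases hj
        exact hout
      · rw [PySem.Dict.get?_insert_of_ne _ _ hji] at hj
        exact h2 j l hj

-- the children dict built by the modify loop looks up to pvChildren
lemma pvChildren_fold (d : PySem.Dict Int Int) (a : PySem.Dict Int (List Int))
    (ha : ∀ x, a.getD x ([] : List Int) = []) (c : Int) :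
    (d.items.foldl (fun a kv => if kv.1 ≠ kv.2 then a.modify kv.2 [] (· ++ [kv.1]) else a) a).getD c []
      = pvChildren d c := by
  have h1 : (d.items.foldl (fun a kv => if kv.1 ≠ kv.2 then a.modify kv.2 [] (· ++ [kv.1]) else a) a)
      = ((d.items.filter (fun kv => decide (kv.1 ≠ kv.2))).map (fun kv => (kv.2, kv.1))).foldl
          (fun a p => a.modify p.1 [] (· ++ [p.2])) a := by
    rw [PySem.List.foldl_ite_eq_foldl_filter (p := fun kv : Int × Int => kv.1 ≠ kv.2)
        (f := fun (a : PySem.Dict Int (List Int)) (kv : Int × Int) => a.modify kv.2 [] (· ++ [kv.1])),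
      List.foldl_map]
  rw [h1, PySem.Dict.getD_foldl_modify_append, ha]
  simp only [pvChildren, List.nil_append, List.filter_map, List.map_map, List.filter_filter]
  refine congrArg _ (List.filter_congr (fun kv _ => ?_))
  simp only [Function.comp]
  rw [Bool.and_comm]
  by_cases h : kv.1 = kv.2 <;> simp [h]

-- A's adj0 (all-[] init over V) looks up to []
lemma pvAdj0_getD (V : List Int) (a : PySem.Dict Int (List Int))
    (ha : ∀ x, a.getD x ([] : List Int) = []) (c : Int) :
    (V.foldl (fun a i => a.insert i []) a).getD c [] = [] := by
  induction V generalizing a with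
  | nil => exact ha c
  | cons v V ih =>
    simp only [List.foldl_cons]
    refine ih _ (fun x => ?_)
    rw [PySem.Dict.getD_insert]
    split
    · rfl
    · exact ha x

-- A's res0-then-overwrite double loop produces the association list in V order
lemma pvOverwrite (val : Int → List Int) :
    ∀ (vs : List Int) (r : PySem.Dict Int (List Int)) (done : List (Int × List Int)),
      r.items = done ++ vs.map (fun i => (i, ([] : List Int))) →
      (∀ i ∈ vs, i ∉ done.map Prod.fst) → vs.Nodup →
      (vs.foldl (fun r i => r.insert i (val i)) r).items
        = done ++ vs.map (fun i => (i, val i)) := by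
  intro vs
  induction vs with
  | nil => intro r done hitems _ _; simpa using hitems
  | cons v vs ih =>
    intro r done hitems hdisj hnd
    have hvdone : ∀ p ∈ done, p.1 ≠ v := by
      intro p hp hpv
      exact hdisj v (by simp) (by exact List.mem_map.mpr ⟨p, hp, hpv⟩)
    have hvvs : ∀ i ∈ vs, i ≠ v := by
      intro i hi hiv
      exact (List.nodup_cons.mp hnd).1 (hiv ▸ hi)
    have hcont : r.contains v = true := by
      rw [PySem.Dict.contains_iff_mem_keys]
      simp only [PySem.Dict.keys, hitems]
      simp
    have hitems' : (r.insert v (val v)).items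
        = (done ++ [(v, val v)]) ++ vs.map (fun i => (i, ([] : List Int))) := by
      rw [PySem.Dict.items_insert_of_contains r (val v) hcont, hitems]
      rw [List.map_append, List.map_cons, List.append_assoc, List.singleton_append]
      congr 1
      · rw [List.map_congr_left (fun p hp => by simp [hvdone p hp] :
          ∀ p ∈ done, (if (p.1 == v) = true then (v, val v) else p) = id p)]
        exact List.map_id done
      · rw [List.map_cons, List.map_map]
        have h1 : (if (((v, ([] : List Int)).1 == v) = true) then (v, val v) else (v, ([] : List Int)))
            = (v, val v) := by simp
        rw [h1]
        congr 1
        refine List.map_congr_left (fun i hi => ?_)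
        simp only [Function.comp]
        rw [if_neg (by simp [hvvs i hi])]
    simp only [List.foldl_cons]
    rw [ih (r.insert v (val v)) (done ++ [(v, val v)]) hitems'
      (fun i hi => ?_) (List.nodup_cons.mp hnd).2]
    · simp
    · simp only [List.map_append, List.mem_append]
      rintro (h | h)
      · exact hdisj i (by simp [hi]) h
      · simp at h
        exact hvvs i hi h

-- B's output loop produces the same association list, via the memo invariant
lemma pvAltLoop (d : PySem.Dict Int Int) (F : Nat)
    (ch : PySem.Dict Int (List Int)) (hch : ∀ x, ch.getD x [] = pvChildren d x)
    (hF : ∀ j, pvBnd d j F) :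
    ∀ (vs : List Int) (memo : PySem.Dict Int (List Int)) (out : List (Int × List Int)),
      pvGood d F memo →
      (vs.foldl (fun (st : PySem.Dict Int (List Int) × List (Int × List Int)) i =>
          let r := pvDescB F ch st.1 i
          (r.1, st.2 ++ [(i, PySem.Set.ofList r.2)])) (memo, out)).2
        = out ++ vs.map (fun i => (i, PySem.Set.ofList (pvDesc d F i))) := by
  intro vs
  induction vs with
  | nil => intro memo out _; simp
  | cons v vs ih =>
    intro memo out hg
    simp only [List.foldl_cons]
    obtain ⟨h2, h1⟩ := pvDescB_eq d F ch hch hF F v memo hg (hF v) (hF v)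
    set r := pvDescB F ch memo v with hr
    rw [show ((r.1, out ++ [(v, PySem.Set.ofList r.2)]) : PySem.Dict Int (List Int) × List (Int × List Int))
        = ((r.1, out ++ [(v, PySem.Set.ofList r.2)]).1, (r.1, out ++ [(v, PySem.Set.ofList r.2)]).2) from rfl]
    rw [ih (r.1, out ++ [(v, PySem.Set.ofList r.2)]).1 (r.1, out ++ [(v, PySem.Set.ofList r.2)]).2 h1]
    simp [h2]

-- the V set is duplicate-free
lemma pvV_nodup (items : List (Int × Int)) :
    (items.foldl (fun s kv => PySem.Set.add (PySem.Set.add s kv.1) kv.2) PySem.Set.empty).Nodup := by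
  have h : ∀ (l : List (Int × Int)) (s : PySem.Set Int), s.Nodup →
      (l.foldl (fun s kv => PySem.Set.add (PySem.Set.add s kv.1) kv.2) s).Nodup := by
    intro l
    induction l with
    | nil => exact fun s h => h
    | cons kv l ihl =>
      intro s hs
      exact ihl _ (PySem.Set.nodup_add _ _ (PySem.Set.nodup_add _ _ hs))
  exact h items PySem.Set.empty List.nodup_nil

-- assembling both programs
lemma pvMain (ms : List (Int × Int))
    (hpre : Pre_employeeToManager_Report ms) :
    employeeToManager_Report ms = employeeToManager_Report_alt ms := by
  unfold Pre_employeeToManager_Report at hpre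
  simp only [employeeToManager_Report, employeeToManager_Report_alt]
  set d := PySem.Dict.ofList ms with hd
  have hnd : d.keys.Nodup := PySem.Dict.nodup_keys_ofList ms
  have hBnd : ∀ i, pvBnd d i (d.size + 1) := pvChain_bound d hnd hpre
  have hF : ∀ j, pvBnd d j (d.size + 2) := fun j => pvBnd_mono d j _ _ (by omega) (hBnd j)
  set V : PySem.Set Int :=
    d.items.foldl (fun s kv => PySem.Set.add (PySem.Set.add s kv.1) kv.2) PySem.Set.empty with hV
  have hVnd : V.Nodup := pvV_nodup d.items
  -- B's fused one-pass loop is the V loop paired with the children loop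
  rw [PySem.List.foldl_prod_mk
    (f := fun (s : PySem.Set Int) (kv : Int × Int) => PySem.Set.add (PySem.Set.add s kv.1) kv.2)
    (g := fun (a : PySem.Dict Int (List Int)) (kv : Int × Int) =>
      if kv.1 ≠ kv.2 then a.modify kv.2 [] (· ++ [kv.1]) else a)]
  -- both children dicts look up to pvChildren d
  have hchB : ∀ x, (d.items.foldl (fun a kv =>
      if kv.1 ≠ kv.2 then a.modify kv.2 [] (· ++ [kv.1]) else a) PySem.Dict.empty).getD x []
        = pvChildren d x :=
    fun x => pvChildren_fold d PySem.Dict.empty (fun y => PySem.Dict.getD_empty y []) x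
  have hadjA : ∀ x, (d.items.foldl (fun a kv =>
      if kv.1 ≠ kv.2 then a.modify kv.2 [] (· ++ [kv.1]) else a)
        (V.foldl (fun a i => a.insert i []) PySem.Dict.empty)).getD x []
        = pvChildren d x :=
    fun x => pvChildren_fold d _
      (fun y => pvAdj0_getD V PySem.Dict.empty (fun z => PySem.Dict.getD_empty z []) y) x
  -- B's side
  rw [pvAltLoop d (d.size + 2) _ hchB hF V PySem.Dict.empty []
    (fun j l hj => absurd (hj ▸ PySem.Dict.get?_empty j) (by simp))]
  -- A's side: res0 is the all-[] association list over V …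
  have hres0 : (V.foldl (fun r i => r.insert i []) PySem.Dict.empty).items
      = ([] : List (Int × List Int)) ++ V.map (fun i => (i, ([] : List Int))) := by
    have h := PySem.Dict.items_foldl_insert_fresh V (fun i => i) (fun _ => ([] : List Int))
      PySem.Dict.empty (fun a _ => PySem.Dict.contains_empty a) (by simpa using hVnd)
    simpa using h
  -- … and the second V loop overwrites it entry by entry
  rw [pvOverwrite _ V _ [] hres0 (by simp) hVnd]
  -- pointwise, A's dfs produces the pure descendant list
  rw [List.nil_append, List.nil_append]
  refine List.map_congr_left (fun i _ => ?_)
  have hdfs := pvDfsA_eq d _ hadjA (d.size + 2) i PySem.Set.empty []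
  rw [if_pos (by rfl), hdfs]
  rw [List.nil_append]

-- ===== VERDICT (by name: the statement is the Claim_ definition above) =====
theorem employeeToManager_Report_spec : Claim_equal_employeeToManager_Report := by
  intro ms _ hpre
  exact pvMain ms hpre
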